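-- pv_equiv track=rewrite | github.com/shixuev5/patent | backend/ai_search/reporting.py | _compress_claim_ids
-- ===== SOURCE A (Python) =====
-- from typing import Any, Dict, Iterable, List, Optional
--
-- def _unique_strings(values: Iterable[Any]) -> List[str]:
--     items: List[str] = []
--     seen: set[str] = set()
--     for value in values:
--         text = str(value or "").strip()
--         if text and text not in seen:
--             seen.add(text)
--             items.append(text)
--     return items
--
-- def _compress_claim_ids(values: Iterable[Any]) -> str:
--     raw_items = _unique_strings(values)
--     numeric = sorted({int(item) for item in raw_items if item.isdigit()})
--     textual = sorted(item for item in raw_items if not item.isdigit())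
--     ranges: List[str] = []
--     if numeric:
--         start = numeric[0]
--         end = numeric[0]
--         for value in numeric[1:]:
--             if value == end + 1:
--                 end = value
--                 continue
--             ranges.append(str(start) if start == end else f"{start}-{end}")
--             start = value
--             end = value
--         ranges.append(str(start) if start == end else f"{start}-{end}")
--     return ",".join(ranges + textual)
-- ===== SOURCE B (Python) =====
-- from typing import Any, Iterable, List
--
--
-- def _label(start: int, end: int) -> str:
--     return str(start) if start == end else f"{start}-{end}"
--
--
-- def _emit(start: int, end: int, rest: List[int]) -> List[str]:
--     # rest is a strictly increasing list; extend the current run or close it and recurse.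
--     if not rest:
--         return [_label(start, end)]
--     v, tail = rest[0], rest[1:]
--     if v == end + 1:
--         return _emit(start, v, tail)
--     return [_label(start, end)] + _emit(v, v, tail)
--
--
-- def _compress_claim_ids(values: Iterable[Any]) -> str:
--     # One pass: dedup and classify each new item as numeric or textual on the spot.
--     seen: set[str] = set()
--     nums: set[int] = set()
--     texts: List[str] = []
--     for value in values:
--         text = str(value or "").strip()
--         if text and text not in seen:
--             seen.add(text)
--             if text.isdigit():
--                 nums.add(int(text))
--             else:
--                 texts.append(text)
--     numeric = sorted(nums)
--     ranges = _emit(numeric[0], numeric[0], numeric[1:]) if numeric else []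
--     return ",".join(ranges + sorted(texts))
-- ===== Notes on version B (the rewrite author's own statement) =====
-- stated objective: alternative
-- what changed: B classifies items as numeric/textual in a single dedup pass (A builds a dedup list then filters it twice) and emits the ranges by structural recursion building the output front-to-back instead of A's imperative loop threading a running (ranges, start, end) accumulator.
import Mathlib
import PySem

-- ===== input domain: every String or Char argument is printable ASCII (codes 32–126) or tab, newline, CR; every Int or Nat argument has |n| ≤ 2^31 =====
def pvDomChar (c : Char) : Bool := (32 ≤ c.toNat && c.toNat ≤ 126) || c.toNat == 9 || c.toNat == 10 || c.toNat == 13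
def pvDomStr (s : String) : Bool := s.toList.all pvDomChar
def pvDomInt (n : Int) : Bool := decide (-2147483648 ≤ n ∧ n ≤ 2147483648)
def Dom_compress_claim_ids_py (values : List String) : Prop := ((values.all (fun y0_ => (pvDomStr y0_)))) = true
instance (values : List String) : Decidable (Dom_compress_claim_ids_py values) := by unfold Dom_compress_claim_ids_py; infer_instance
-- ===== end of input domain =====

-- B classifies items as numeric/textual in one dedup pass and emits the ranges by structural
-- recursion instead of A's dedup-then-filter-twice and imperative running-(start,end) loop;
-- alternative decomposition, same cost.


-- shared formatting expression: `str(start) if start == end else f"{start}-{end}"`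
-- (occurs literally in both Pythons)
def fmtRun (start e : Int) : String :=
  if start = e then PySem.Int.toStr start
  else PySem.Str.join "" [PySem.Int.toStr start, "-", PySem.Int.toStr e]

-- `int(item)`; only applied to isdigit-true items, where ofStr? is always `some`
def intOf (s : String) : Int := (PySem.Int.ofStr? s).getD 0

-- ===== PORT A =====
-- _unique_strings: fold over values with (items, seen); `str(value or "")` on a string is
-- `""` when value is falsy (empty) and value itself otherwise.
def uniqueStringsA (values : List String) : List String :=
  (values.foldl
    (fun (st : List String × PySem.Set String) value =>
      let text := PySem.Str.strip (if value = "" then "" else value)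
      if text ≠ "" ∧ text ∉ st.2 then (st.1 ++ [text], PySem.Set.add st.2 text) else st)
    ([], PySem.Set.empty)).1

def compress_claim_ids_py (values : List String) : String :=
  let raw := uniqueStringsA values
  let numeric := PySem.List.sorted
    (PySem.Set.ofList ((raw.filter (fun i => PySem.Str.strIsdigit i)).map intOf))
    (fun x => x) false
  let textual := PySem.List.sorted (raw.filter (fun i => !PySem.Str.strIsdigit i)) (fun x => x) false
  let ranges : List String :=
    match numeric with
    | [] => []
    | n0 :: rest =>
      let st := rest.foldl
        (fun (st : List String × Int × Int) value =>
          if value = st.2.2 + 1 then (st.1, st.2.1, value)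
          else (st.1 ++ [fmtRun st.2.1 st.2.2], value, value))
        ([], n0, n0)
      st.1 ++ [fmtRun st.2.1 st.2.2]
  PySem.Str.join "," (ranges ++ textual)

-- ===== PORT B =====
-- one dedup pass classifying each fresh item as numeric or textual
def classifyB (values : List String) : PySem.Set String × PySem.Set Int × List String :=
  values.foldl
    (fun (st : PySem.Set String × PySem.Set Int × List String) value =>
      let text := PySem.Str.strip (if value = "" then "" else value)
      if text ≠ "" ∧ text ∉ st.1 then
        if PySem.Str.strIsdigit text
        then (PySem.Set.add st.1 text, PySem.Set.add st.2.1 (intOf text), st.2.2)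
        else (PySem.Set.add st.1 text, st.2.1, st.2.2 ++ [text])
      else st)
    (PySem.Set.empty, PySem.Set.empty, [])

-- _emit: structural recursion over the strictly increasing tail, output built front-to-back
def emitB (start e : Int) : List Int → List String
  | [] => [fmtRun start e]
  | v :: vs => if v = e + 1 then emitB start v vs else fmtRun start e :: emitB v v vs

def compress_claim_ids_py_alt (values : List String) : String :=
  let st := classifyB values
  let numeric := PySem.List.sorted st.2.1 (fun x => x) false
  let ranges : List String :=
    match numeric with
    | [] => []
    | n0 :: rest => emitB n0 n0 rest
  PySem.Str.join "," (ranges ++ PySem.List.sorted st.2.2 (fun x => x) false)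

-- ===== PRECONDITION & SPEC =====
def Spec_compress_claim_ids_py (values : List String) (out : String) : Prop := out = compress_claim_ids_py_alt values
instance (values : List String) (out : String) : Decidable (Spec_compress_claim_ids_py values out) := by unfold Spec_compress_claim_ids_py; infer_instance

-- ===== CLAIM (what is proved, stated in full; the proofs are below) =====
def Claim_equal_compress_claim_ids_py : Prop := ∀ (values : List String), Dom_compress_claim_ids_py values → Spec_compress_claim_ids_py values (compress_claim_ids_py values)

-- ===== LEMMAS AND PROOFS =====

-- B's fold state is determined by A's fold state: nums is the set of int-values of the
-- digit items seen so far, texts the non-digit items, seen the same set.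
theorem classify_rel (values : List String) :
    ∀ (items : List String) (seen : PySem.Set String),
      values.foldl
        (fun (st : PySem.Set String × PySem.Set Int × List String) value =>
          let text := PySem.Str.strip (if value = "" then "" else value)
          if text ≠ "" ∧ text ∉ st.1 then
            if PySem.Str.strIsdigit text
            then (PySem.Set.add st.1 text, PySem.Set.add st.2.1 (intOf text), st.2.2)
            else (PySem.Set.add st.1 text, st.2.1, st.2.2 ++ [text])
          else st)
        (seen, PySem.Set.ofList ((items.filter (fun i => PySem.Str.strIsdigit i)).map intOf),
          items.filter (fun i => !PySem.Str.strIsdigit i))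
      =
      (let st := values.foldl
        (fun (st : List String × PySem.Set String) value =>
          let text := PySem.Str.strip (if value = "" then "" else value)
          if text ≠ "" ∧ text ∉ st.2 then (st.1 ++ [text], PySem.Set.add st.2 text) else st)
        (items, seen)
       (st.2, PySem.Set.ofList ((st.1.filter (fun i => PySem.Str.strIsdigit i)).map intOf),
         st.1.filter (fun i => !PySem.Str.strIsdigit i))) := by
  induction values with
  | nil => intro items seen; rfl
  | cons v vs ih =>
    intro items seen
    simp only [List.foldl_cons]
    by_cases h : PySem.Str.strip (if v = "" then "" else v) ≠ ""
        ∧ PySem.Str.strip (if v = "" then "" else v) ∉ seen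
    · by_cases hd : PySem.Str.strIsdigit (PySem.Str.strip (if v = "" then "" else v)) = true
      · have := ih (items ++ [PySem.Str.strip (if v = "" then "" else v)])
          (PySem.Set.add seen (PySem.Str.strip (if v = "" then "" else v)))
        simp only [List.filter_append, List.map_append, List.filter_cons, List.filter_nil,
          hd, Bool.not_true, if_pos h, PySem.Set.ofList] at this ⊢
        simpa [List.foldl_append, List.append_nil] using this
      · have := ih (items ++ [PySem.Str.strip (if v = "" then "" else v)])
          (PySem.Set.add seen (PySem.Str.strip (if v = "" then "" else v)))
        simp only [List.filter_append, List.map_append, List.filter_cons, List.filter_nil,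
          hd, if_pos h, PySem.Set.ofList] at this ⊢
        simpa [List.foldl_append, List.append_nil, hd] using this
    · simpa [if_neg h] using ih items seen

-- A's running-(ranges, start, end) loop equals B's recursive run emission, for any tail.
theorem loop_eq_emit (rest : List Int) :
    ∀ (acc : List String) (start e : Int),
      (let st := rest.foldl
        (fun (st : List String × Int × Int) value =>
          if value = st.2.2 + 1 then (st.1, st.2.1, value)
          else (st.1 ++ [fmtRun st.2.1 st.2.2], value, value))
        (acc, start, e)
       st.1 ++ [fmtRun st.2.1 st.2.2]) = acc ++ emitB start e rest := by
  induction rest with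
  | nil => intro acc start e; simp [emitB]
  | cons v vs ih =>
    intro acc start e
    by_cases h : v = e + 1
    · simpa [List.foldl_cons, emitB, h] using ih acc start v
    · simpa [List.foldl_cons, emitB, h, List.append_assoc] using ih (acc ++ [fmtRun start e]) v v

-- ===== VERDICT (by name: the statement is the Claim_ definition above) =====
theorem compress_claim_ids_py_spec : Claim_equal_compress_claim_ids_py := by
  intro values _
  simp only [Spec_compress_claim_ids_py, compress_claim_ids_py, compress_claim_ids_py_alt,
    uniqueStringsA, classifyB]
  have hcl := classify_rel values [] PySem.Set.empty
  simp only [List.filter_nil, List.map_nil] at hcl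
  have h0 : PySem.Set.ofList ([] : List Int) = PySem.Set.empty := rfl
  rw [h0] at hcl
  rw [hcl]
  cases hnum : PySem.List.sorted
      (PySem.Set.ofList
        (((values.foldl
            (fun (st : List String × PySem.Set String) value =>
              let text := PySem.Str.strip (if value = "" then "" else value)
              if text ≠ "" ∧ text ∉ st.2 then (st.1 ++ [text], PySem.Set.add st.2 text) else st)
            ([], PySem.Set.empty)).1.filter (fun i => PySem.Str.strIsdigit i)).map intOf))
      (fun x => x) false with
  | nil => simp
  | cons n0 rest => simp only [loop_eq_emit rest [] n0 n0, List.nil_append]
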